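-- pv_equiv track=rewrite | github.com/LiQian2023/daily_practice_py | 24.11.24_leetcode/practice.py | takeAttendance1
-- ===== SOURCE A (Python) =====
-- def takeAttendance1(records):
--     """
--     :type records: List[int]
--     :rtype: int
--     """
--     i = 0
--     length = len(records)
--     while i < length:
--         if records[i] != i:
--             break
--         i += 1
--     return i
-- ===== SOURCE B (Python) =====
-- def takeAttendance1(records):
--     """
--     :type records: List[int]
--     :rtype: int
--     """
--     ans = len(records)
--     for i in range(len(records) - 1, -1, -1):
--         if records[i] != i:
--             ans = i
--     return ans
-- ===== Notes on version B (the rewrite author's own statement) =====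
-- stated objective: alternative
-- what changed: A scans forward with an early break at the first index where records[i] != i; B scans backward over the whole list, overwriting the answer at every mismatch, so the last write (the smallest mismatching index) is the result - no break, order-reversed traversal.
import Mathlib
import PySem

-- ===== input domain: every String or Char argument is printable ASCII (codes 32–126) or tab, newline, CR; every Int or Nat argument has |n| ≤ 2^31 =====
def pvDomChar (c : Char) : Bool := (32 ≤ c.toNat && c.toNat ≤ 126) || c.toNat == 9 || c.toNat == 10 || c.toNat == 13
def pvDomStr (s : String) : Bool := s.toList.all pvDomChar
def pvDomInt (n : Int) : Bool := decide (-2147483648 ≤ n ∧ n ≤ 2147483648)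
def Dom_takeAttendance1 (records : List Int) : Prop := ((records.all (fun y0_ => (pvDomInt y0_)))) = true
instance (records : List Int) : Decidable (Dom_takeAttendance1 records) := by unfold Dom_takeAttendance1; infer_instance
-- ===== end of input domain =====

-- B replaces A's forward scan with an early break by a backward full scan that
-- overwrites the answer at every mismatch (alternative decomposition, same cost).

-- ===== PORT A =====
-- A's while loop: i increases while records[i] == i, breaks at the first mismatch.
def goA (records : List Int) (i : Int) : Int :=
  if _h : i < (records.length : Int) then
    if PySem.List.pyGetD records i 0 ≠ i then i else goA records (i + 1)
  else i
termination_by ((records.length : Int) - i).toNat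
decreasing_by omega

def takeAttendance1 (records : List Int) : Int := goA records 0

-- ===== PORT B =====
-- B's for loop over range(len-1, -1, -1), overwriting ans at every mismatch.
def takeAttendance1_alt (records : List Int) : Int :=
  (PySem.List.pyRange ((records.length : Int) - 1) (-1) (-1)).foldl
    (fun ans i => if PySem.List.pyGetD records i 0 ≠ i then i else ans)
    (records.length : Int)

-- ===== PRECONDITION & SPEC =====
def Spec_takeAttendance1 (records : List Int) (out : Int) : Prop := out = takeAttendance1_alt records
instance (records : List Int) (out : Int) : Decidable (Spec_takeAttendance1 records out) := by unfold Spec_takeAttendance1; infer_instance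

-- ===== CLAIM (what is proved, stated in full; the proofs are below) =====
def Claim_equal_takeAttendance1 : Prop := ∀ (records : List Int), Dom_takeAttendance1 records → Spec_takeAttendance1 records (takeAttendance1 records)

-- ===== LEMMAS AND PROOFS =====

-- A's loop from position a equals a right fold of B's step over the ascending range [a, len).
theorem goA_eq_foldr (records : List Int) (a : Int) (h0 : 0 ≤ a)
    (hn : a ≤ (records.length : Int)) :
    goA records a
      = (PySem.List.pyRange a (records.length : Int) 1).foldr
          (fun i ans => if PySem.List.pyGetD records i 0 ≠ i then i else ans)
          (records.length : Int) := by
  by_cases h : a < (records.length : Int)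
  · rw [PySem.List.pyRange_one_cons h, List.foldr_cons, goA]
    simp only [h, dif_pos]
    by_cases hm : PySem.List.pyGetD records a 0 ≠ a
    · simp [hm]
    · simp only [hm, if_false]
      exact goA_eq_foldr records (a + 1) (by omega) (by omega)
  · have ha : a = (records.length : Int) := by omega
    rw [ha, PySem.List.pyRange_one_eq_nil (le_refl _), List.foldr_nil, goA]
    simp
termination_by ((records.length : Int) - a).toNat
decreasing_by omega

-- ===== VERDICT (by name: the statement is the Claim_ definition above) =====
theorem takeAttendance1_spec : Claim_equal_takeAttendance1 := by
  intro records _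
  unfold Spec_takeAttendance1 takeAttendance1 takeAttendance1_alt
  rw [PySem.List.pyRange_neg_one_eq_reverse]
  have : (-1 : Int) + 1 = 0 := by norm_num
  rw [this]
  have hlen : ((records.length : Int) - 1) + 1 = (records.length : Int) := by ring
  rw [hlen, List.foldl_reverse]
  exact goA_eq_foldr records 0 le_rfl (by exact_mod_cast Nat.zero_le _)
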